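-- pv_equiv track=rewrite | github.com/harsha-ys/python | 19_string_validators.py | check
-- ===== SOURCE A (Python) =====
-- def check(string,L,already_changed):
--     if string =="" : return L
--     if len(set(already_changed))==1 and already_changed[0]: return L
--     if not already_changed[0] :
--         if string[0].isalnum() :
--             L[0] = True
--             already_changed[0] = True
--     if not already_changed[1] :
--         if string[0].isalpha() :
--             L[1] = True
--             already_changed[1] = True
--     if not already_changed[2] :
--         if string[0].isdigit() :
--             L[2] = True
--             already_changed[2] = True
--     if not already_changed[3] :
--         if string[0].islower() :
--             L[3] = True
--             already_changed[3] = True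
--     if not already_changed[4] :
--         if string[0].isupper() :
--             L[4] = True
--             already_changed[4] = True
--     return check(string[1:],L,already_changed)
-- ===== SOURCE B (Python) =====
-- def check(string, L, already_changed):
--     if string and not (len(set(already_changed)) == 1 and already_changed[0]):
--         preds = [str.isalnum, str.isalpha, str.isdigit, str.islower, str.isupper]
--         for i, p in enumerate(preds):
--             if not already_changed[i] and any(p(c) for c in string):
--                 L[i] = True
--                 already_changed[i] = True
--     return L
-- ===== Notes on version B (the rewrite author's own statement) =====
-- stated objective: simpler
-- what changed: A recurses character by character (copying string[1:] each step), re-testing the all-flags-set early exit and applying five sequential flag updates per character; B inverts the loops: after one up-front guard it makes a single short-circuiting any()-scan of the string per flag. Pre_ excludes only inputs on which A raises IndexError (already_changed shorter than 5 with the early-exit guard off, or a triggered write L[i]=True outside L).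
import Mathlib
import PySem

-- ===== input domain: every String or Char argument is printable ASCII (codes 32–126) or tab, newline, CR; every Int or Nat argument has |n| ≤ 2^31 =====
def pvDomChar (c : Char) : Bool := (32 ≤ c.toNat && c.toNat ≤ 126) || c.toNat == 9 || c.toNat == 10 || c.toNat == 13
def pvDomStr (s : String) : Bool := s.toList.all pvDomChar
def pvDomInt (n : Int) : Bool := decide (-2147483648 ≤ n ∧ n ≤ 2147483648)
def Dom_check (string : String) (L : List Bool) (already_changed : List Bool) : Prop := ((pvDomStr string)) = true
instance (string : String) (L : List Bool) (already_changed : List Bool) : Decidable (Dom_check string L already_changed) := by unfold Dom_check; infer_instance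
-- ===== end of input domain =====

-- B replaces A's per-character recursion (five sequential flag updates per character, re-checking
-- the all-flags-set early exit each step) by one guarded any()-scan of the string per flag.
-- Both Pythons mutate L and already_changed in place (identically); the equivalence proved here
-- is about the RETURN value.

-- ===== PORT A =====
-- literal transliteration of A: recursion over the characters, five conditional updates in order
def checkA : List Char → List Bool → List Bool → List Bool
  | [], L, _ => L
  | c :: rest, L, ac =>
    if ((PySem.Set.ofList ac).length == 1) && PySem.List.pyGetD ac 0 false then L
    else
      let st1 := if !(PySem.List.pyGetD ac 0 false) then
          (if PySem.Chars.isalnum c then (PySem.List.pySetD L 0 true, PySem.List.pySetD ac 0 true)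
           else (L, ac))
        else (L, ac)
      let st2 := if !(PySem.List.pyGetD st1.2 1 false) then
          (if PySem.Chars.isalpha c then (PySem.List.pySetD st1.1 1 true, PySem.List.pySetD st1.2 1 true)
           else st1)
        else st1
      let st3 := if !(PySem.List.pyGetD st2.2 2 false) then
          (if PySem.Chars.isdigit c then (PySem.List.pySetD st2.1 2 true, PySem.List.pySetD st2.2 2 true)
           else st2)
        else st2
      let st4 := if !(PySem.List.pyGetD st3.2 3 false) then
          (if PySem.Chars.islower c then (PySem.List.pySetD st3.1 3 true, PySem.List.pySetD st3.2 3 true)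
           else st3)
        else st3
      let st5 := if !(PySem.List.pyGetD st4.2 4 false) then
          (if PySem.Chars.isupper c then (PySem.List.pySetD st4.1 4 true, PySem.List.pySetD st4.2 4 true)
           else st4)
        else st4
      checkA rest st5.1 st5.2

def check (string : String) (L : List Bool) (already_changed : List Bool) : List Bool :=
  checkA string.toList L already_changed

-- ===== PORT B =====
-- literal transliteration of B: one guard, then for each (i, p) in enumerate(preds) one any()-scan
def check_alt (string : String) (L : List Bool) (already_changed : List Bool) : List Bool :=
  if !string.toList.isEmpty &&
     !(((PySem.Set.ofList already_changed).length == 1) && PySem.List.pyGetD already_changed 0 false) then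
    let preds : List (Char → Bool) :=
      [PySem.Chars.isalnum, PySem.Chars.isalpha, PySem.Chars.isdigit,
       PySem.Chars.islower, PySem.Chars.isupper]
    ((PySem.List.enumerate preds).foldl
      (fun (st : List Bool × List Bool) ip =>
        if !(PySem.List.pyGetD st.2 ip.1 false) && string.toList.any ip.2 then
          (PySem.List.pySetD st.1 ip.1 true, PySem.List.pySetD st.2 ip.1 true)
        else st)
      (L, already_changed)).1
  else L

-- ===== PRECONDITION & SPEC =====
-- the i-th validator predicate (used by Pre_ and the lemmas; neither port is reached)
def pvPred (i : Nat) : Char → Bool :=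
  [PySem.Chars.isalnum, PySem.Chars.isalpha, PySem.Chars.isdigit,
   PySem.Chars.islower, PySem.Chars.isupper].getD i (fun _ => false)

-- Pre_ excludes exactly the inputs on which A raises IndexError: a nonempty string with
-- already_changed shorter than 5 (unless all its entries are true, so the early-exit guard fires),
-- or a triggered flag i whose write L[i] = True falls outside L.
def Pre_check (string : String) (L : List Bool) (already_changed : List Bool) : Prop :=
  string = "" ∨
  (already_changed ≠ [] ∧ ∀ x ∈ already_changed, x = true) ∨
  (5 ≤ already_changed.length ∧
    ∀ i < 5, (already_changed.getD i false = false ∧ string.toList.any (pvPred i) = true) →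
      i < L.length)
instance (string : String) (L : List Bool) (already_changed : List Bool) : Decidable (Pre_check string L already_changed) := by unfold Pre_check; infer_instance

def pvWitness_check : String × List Bool × List Bool :=
  ("aA1 _", [false, false, false, false, false], [false, false, false, false, false])

def Spec_check (string : String) (L : List Bool) (already_changed : List Bool) (out : List Bool) : Prop := out = check_alt string L already_changed
instance (string : String) (L : List Bool) (already_changed : List Bool) (out : List Bool) : Decidable (Spec_check string L already_changed out) := by unfold Spec_check; infer_instance

-- ===== CLAIM (what is proved, stated in full; the proofs are below) =====
def Claim_equal_check : Prop := ∀ (string : String) (L : List Bool) (already_changed : List Bool), Dom_check string L already_changed → Pre_check string L already_changed → Spec_check string L already_changed (check string L already_changed)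

-- ===== LEMMAS AND PROOFS =====

-- one conditional flag update (reads index k of the flag list, writes index k of both lists)
def pvStep (q : Bool) (k : Nat) (st : List Bool × List Bool) : List Bool × List Bool :=
  if !(st.2.getD k false) && q then (st.1.set k true, st.2.set k true) else st

-- the five updates in order
def pvChain (q : Nat → Bool) (st : List Bool × List Bool) : List Bool × List Bool :=
  pvStep (q 4) 4 (pvStep (q 3) 3 (pvStep (q 2) 2 (pvStep (q 1) 1 (pvStep (q 0) 0 st))))

-- the early-exit guard both programs test
def pvGuard (ac : List Bool) : Bool := ((PySem.Set.ofList ac).length == 1) && ac.getD 0 false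

theorem pvStepEq (p : Bool) (k : Nat) (Lc ac : List Bool) :
    (if !(ac.getD k false) then
       (if p then (Lc.set k true, ac.set k true) else (Lc, ac)) else (Lc, ac))
      = pvStep p k (Lc, ac) := by
  cases h : ac.getD k false <;> cases p <;> rw [pvStep, h] <;> simp

theorem pvStepEq' (p : Bool) (k : Nat) (st : List Bool × List Bool) :
    (if !(st.2.getD k false) then
       (if p then (st.1.set k true, st.2.set k true) else st) else st)
      = pvStep p k st := by
  cases h : st.2.getD k false <;> cases p <;> rw [pvStep, h] <;> simp

theorem pvStepFold (p : Bool) (k : Nat) (Lc ac : List Bool) :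
    (if !(ac.getD k false) && p then (Lc.set k true, ac.set k true) else (Lc, ac))
      = pvStep p k (Lc, ac) := rfl

theorem pvStepFold' (p : Bool) (k : Nat) (st : List Bool × List Bool) :
    (if !(st.2.getD k false) && p then (st.1.set k true, st.2.set k true) else st)
      = pvStep p k st := rfl

theorem pvSetD_two (xs : List Bool) (v : Bool) : PySem.List.pySetD xs 2 v = xs.set 2 v := by
  rw [PySem.List.pySetD_of_nonneg xs v (by norm_num)]; rfl
theorem pvSetD_three (xs : List Bool) (v : Bool) : PySem.List.pySetD xs 3 v = xs.set 3 v := by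
  rw [PySem.List.pySetD_of_nonneg xs v (by norm_num)]; rfl
theorem pvSetD_four (xs : List Bool) (v : Bool) : PySem.List.pySetD xs 4 v = xs.set 4 v := by
  rw [PySem.List.pySetD_of_nonneg xs v (by norm_num)]; rfl

theorem pvSetD_zero (xs : List Bool) (v : Bool) : PySem.List.pySetD xs 0 v = xs.set 0 v := by
  rw [PySem.List.pySetD_of_nonneg xs v (by norm_num)]; rfl
theorem pvSetD_one (xs : List Bool) (v : Bool) : PySem.List.pySetD xs 1 v = xs.set 1 v := by
  rw [PySem.List.pySetD_of_nonneg xs v (by norm_num)]; rfl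

theorem pvBridgeA (c : Char) (s : List Char) (L ac : List Bool) :
    checkA (c :: s) L ac =
      if pvGuard ac then L
      else checkA s (pvChain (fun k => pvPred k c) (L, ac)).1
                    (pvChain (fun k => pvPred k c) (L, ac)).2 := by
  rw [checkA]
  simp only [PySem.List.pyGetD_ofNat', pvSetD_zero, pvSetD_one, pvSetD_two, pvSetD_three, pvSetD_four,
    pvStepEq, pvStepEq', pvGuard, pvChain, pvPred]
  rfl

theorem pvBridgeB (string : String) (h : string.toList.isEmpty = false) (L ac : List Bool) :
    check_alt string L ac =
      if pvGuard ac then L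
      else (pvChain (fun k => string.toList.any (pvPred k)) (L, ac)).1 := by
  have henum : PySem.List.enumerate
      ([PySem.Chars.isalnum, PySem.Chars.isalpha, PySem.Chars.isdigit,
        PySem.Chars.islower, PySem.Chars.isupper] : List (Char → Bool)) =
      [(0, PySem.Chars.isalnum), (1, PySem.Chars.isalpha), (2, PySem.Chars.isdigit),
       (3, PySem.Chars.islower), (4, PySem.Chars.isupper)] := by rfl
  rw [check_alt]
  simp only [h, Bool.not_false, Bool.true_and, henum, List.foldl_cons, List.foldl_nil,
    PySem.List.pyGetD_ofNat', pvSetD_zero, pvSetD_one, pvSetD_two, pvSetD_three, pvSetD_four]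
  simp only [pvStepFold, pvStepFold']
  simp only [pvChain, pvPred, List.getD_cons_zero, List.getD_cons_succ, pvGuard]
  cases hg : (List.length (PySem.Set.ofList ac) == 1 && ac.getD 0 false) <;> simp [hg]

theorem pvStep_len (q : Bool) (k : Nat) (st : List Bool × List Bool) :
    (pvStep q k st).2.length = st.2.length := by
  unfold pvStep; split <;> simp

theorem pvStep_fst_ne {j k : Nat} (h : j ≠ k) (q : Bool) (st : List Bool × List Bool) :
    (pvStep q k st).1[j]? = st.1[j]? := by
  unfold pvStep; split <;> simp [List.getElem?_set_ne (Ne.symm h)]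

theorem pvStep_snd_ne {j k : Nat} (h : j ≠ k) (q : Bool) (st : List Bool × List Bool) :
    (pvStep q k st).2.getD j false = st.2.getD j false := by
  unfold pvStep; split <;>
    simp [List.getD_eq_getElem?_getD, List.getElem?_set_ne (Ne.symm h)]

theorem pvStep_fst_eq (q : Bool) (k : Nat) (st : List Bool × List Bool) :
    (pvStep q k st).1[k]? = st.1[k]?.map (fun b => b || (!(st.2.getD k false) && q)) := by
  unfold pvStep
  split
  · rename_i hc
    simp only [hc]
    cases hL : st.1[k]? with
    | none =>
      have hlen := List.getElem?_eq_none_iff.mp hL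
      rw [List.getElem?_set]
      rw [if_pos rfl, if_neg (by omega)]
      simp
    | some b =>
      obtain ⟨hk, -⟩ := List.getElem?_eq_some_iff.mp hL
      rw [List.getElem?_set_self hk]
      simp
  · rename_i hc
    have hc' : (!(st.2.getD k false) && q) = false := by
      revert hc; cases (!(st.2.getD k false) && q) <;> simp
    rw [List.getD_eq_getElem?_getD] at hc'
    simp [hc']

theorem pvStep_snd_eq (q : Bool) (k : Nat) (st : List Bool × List Bool)
    (hk : k < st.2.length) :
    (pvStep q k st).2.getD k false = (st.2.getD k false || q) := by
  cases hg : st.2.getD k false <;> cases q <;>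
    rw [List.getD_eq_getElem?_getD] at hg <;>
    simp [pvStep, hg, List.getD_eq_getElem?_getD, List.getElem?_set_self hk]

theorem pvChain_len (q : Nat → Bool) (st : List Bool × List Bool) :
    (pvChain q st).2.length = st.2.length := by
  simp [pvChain, pvStep_len]

theorem pvChain_fst_ge (q : Nat → Bool) (st : List Bool × List Bool) {j : Nat} (hj : 5 ≤ j) :
    (pvChain q st).1[j]? = st.1[j]? := by
  unfold pvChain
  rw [pvStep_fst_ne (by omega), pvStep_fst_ne (by omega), pvStep_fst_ne (by omega),
      pvStep_fst_ne (by omega), pvStep_fst_ne (by omega)]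

theorem pvChain_fst (q : Nat → Bool) (st : List Bool × List Bool) {j : Nat} (hj : j < 5) :
    (pvChain q st).1[j]? = st.1[j]?.map (fun b => b || (!(st.2.getD j false) && q j)) := by
  unfold pvChain
  interval_cases j
  · simp only [pvStep_fst_ne (show (0:Nat) ≠ 4 by decide), pvStep_fst_ne (show (0:Nat) ≠ 3 by decide),
      pvStep_fst_ne (show (0:Nat) ≠ 2 by decide), pvStep_fst_ne (show (0:Nat) ≠ 1 by decide),
      pvStep_fst_eq]
  · simp only [pvStep_fst_ne (show (1:Nat) ≠ 4 by decide), pvStep_fst_ne (show (1:Nat) ≠ 3 by decide),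
      pvStep_fst_ne (show (1:Nat) ≠ 2 by decide), pvStep_fst_eq,
      pvStep_fst_ne (show (1:Nat) ≠ 0 by decide), pvStep_snd_ne (show (1:Nat) ≠ 0 by decide)]
  · simp only [pvStep_fst_ne (show (2:Nat) ≠ 4 by decide), pvStep_fst_ne (show (2:Nat) ≠ 3 by decide),
      pvStep_fst_eq, pvStep_fst_ne (show (2:Nat) ≠ 1 by decide), pvStep_fst_ne (show (2:Nat) ≠ 0 by decide),
      pvStep_snd_ne (show (2:Nat) ≠ 1 by decide), pvStep_snd_ne (show (2:Nat) ≠ 0 by decide)]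
  · simp only [pvStep_fst_ne (show (3:Nat) ≠ 4 by decide), pvStep_fst_eq,
      pvStep_fst_ne (show (3:Nat) ≠ 2 by decide), pvStep_fst_ne (show (3:Nat) ≠ 1 by decide),
      pvStep_fst_ne (show (3:Nat) ≠ 0 by decide), pvStep_snd_ne (show (3:Nat) ≠ 2 by decide),
      pvStep_snd_ne (show (3:Nat) ≠ 1 by decide), pvStep_snd_ne (show (3:Nat) ≠ 0 by decide)]
  · simp only [pvStep_fst_eq, pvStep_fst_ne (show (4:Nat) ≠ 3 by decide),
      pvStep_fst_ne (show (4:Nat) ≠ 2 by decide), pvStep_fst_ne (show (4:Nat) ≠ 1 by decide),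
      pvStep_fst_ne (show (4:Nat) ≠ 0 by decide), pvStep_snd_ne (show (4:Nat) ≠ 3 by decide),
      pvStep_snd_ne (show (4:Nat) ≠ 2 by decide), pvStep_snd_ne (show (4:Nat) ≠ 1 by decide),
      pvStep_snd_ne (show (4:Nat) ≠ 0 by decide)]

theorem pvChain_snd (q : Nat → Bool) (st : List Bool × List Bool) {j : Nat} (hj : j < 5)
    (hk : j < st.2.length) :
    (pvChain q st).2.getD j false = (st.2.getD j false || q j) := by
  unfold pvChain
  interval_cases j
  · rw [pvStep_snd_ne (show (0:Nat) ≠ 4 by decide), pvStep_snd_ne (show (0:Nat) ≠ 3 by decide),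
      pvStep_snd_ne (show (0:Nat) ≠ 2 by decide), pvStep_snd_ne (show (0:Nat) ≠ 1 by decide),
      pvStep_snd_eq (q 0) 0 st hk]
  · rw [pvStep_snd_ne (show (1:Nat) ≠ 4 by decide), pvStep_snd_ne (show (1:Nat) ≠ 3 by decide),
      pvStep_snd_ne (show (1:Nat) ≠ 2 by decide),
      pvStep_snd_eq (q 1) 1 (pvStep (q 0) 0 st) (by rw [pvStep_len]; exact hk),
      pvStep_snd_ne (show (1:Nat) ≠ 0 by decide)]
  · rw [pvStep_snd_ne (show (2:Nat) ≠ 4 by decide), pvStep_snd_ne (show (2:Nat) ≠ 3 by decide),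
      pvStep_snd_eq (q 2) 2 (pvStep (q 1) 1 (pvStep (q 0) 0 st))
        (by rw [pvStep_len, pvStep_len]; exact hk),
      pvStep_snd_ne (show (2:Nat) ≠ 1 by decide), pvStep_snd_ne (show (2:Nat) ≠ 0 by decide)]
  · rw [pvStep_snd_ne (show (3:Nat) ≠ 4 by decide),
      pvStep_snd_eq (q 3) 3 (pvStep (q 2) 2 (pvStep (q 1) 1 (pvStep (q 0) 0 st)))
        (by rw [pvStep_len, pvStep_len, pvStep_len]; exact hk),
      pvStep_snd_ne (show (3:Nat) ≠ 2 by decide), pvStep_snd_ne (show (3:Nat) ≠ 1 by decide),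
      pvStep_snd_ne (show (3:Nat) ≠ 0 by decide)]
  · rw [pvStep_snd_eq (q 4) 4 (pvStep (q 3) 3 (pvStep (q 2) 2 (pvStep (q 1) 1 (pvStep (q 0) 0 st))))
        (by rw [pvStep_len, pvStep_len, pvStep_len, pvStep_len]; exact hk),
      pvStep_snd_ne (show (4:Nat) ≠ 3 by decide), pvStep_snd_ne (show (4:Nat) ≠ 2 by decide),
      pvStep_snd_ne (show (4:Nat) ≠ 1 by decide), pvStep_snd_ne (show (4:Nat) ≠ 0 by decide)]

theorem pvGuard_all_true {ac : List Bool} (hg : pvGuard ac = true) : ∀ x ∈ ac, x = true := by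
  unfold pvGuard at hg
  rw [Bool.and_eq_true, beq_iff_eq] at hg
  obtain ⟨h1, h2⟩ := hg
  obtain ⟨b, hb⟩ := List.length_eq_one_iff.mp h1
  intro x hx
  have hxb : x = b := by
    have := (PySem.Set.mem_ofList ac x).mpr hx
    rw [hb] at this; simpa using this
  cases ac with
  | nil => simp at hx
  | cons a t =>
    have ha : a = true := by simpa using h2
    have hab : a = b := by
      have := (PySem.Set.mem_ofList (a :: t) a).mpr (by simp)
      rw [hb] at this; simpa using this
    rw [hxb, ← hab, ha]

theorem pvOfList_all_true_aux (t : List Bool) (h : ∀ x ∈ t, x = true) :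
    t.foldl PySem.Set.add [true] = [true] := by
  induction t with
  | nil => rfl
  | cons a t ih =>
    have ha : a = true := h a (by simp)
    rw [List.foldl_cons, ha]
    have : PySem.Set.add [true] true = [true] := by decide
    rw [this]
    exact ih (fun x hx => h x (by simp [hx]))

theorem pvAll_true_guard (ac : List Bool) (hne : ac ≠ []) (h : ∀ x ∈ ac, x = true) :
    pvGuard ac = true := by
  cases ac with
  | nil => exact absurd rfl hne
  | cons a t =>
    have ha : a = true := h a (by simp)
    subst ha
    have hof : PySem.Set.ofList (true :: t) = [true] := by
      rw [PySem.Set.ofList_eq_foldl, List.foldl_cons]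
      have : PySem.Set.add [] true = [true] := by decide
      rw [this]
      exact pvOfList_all_true_aux t (fun x hx => h x (by simp [hx]))
    simp [pvGuard, hof]

theorem pvLemA (s : List Char) : ∀ (L ac : List Bool), 5 ≤ ac.length → ∀ j : Nat,
    (checkA s L ac)[j]? =
      if j < 5 then L[j]?.map (fun b => b || (!(ac.getD j false) && s.any (pvPred j)))
      else L[j]? := by
  induction s with
  | nil =>
    intro L ac h5 j
    rw [checkA]
    split
    · cases L[j]? <;> simp
    · rfl
  | cons c s ih =>
    intro L ac h5 j
    rw [pvBridgeA]
    by_cases hg : pvGuard ac = true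
    · rw [if_pos hg]
      split
      · rename_i hj
        have hacj : ac.getD j false = true := by
          have hjl : j < ac.length := by omega
          rw [List.getD_eq_getElem?_getD, List.getElem?_eq_getElem hjl]
          exact pvGuard_all_true hg _ (List.getElem_mem hjl)
        simp only [hacj, Bool.not_true, Bool.false_and, Bool.or_false]
        cases L[j]? <;> simp
      · rfl
    · rw [if_neg hg]
      rw [ih _ _ (by rw [pvChain_len]; exact h5)]
      by_cases hj : j < 5
      · rw [if_pos hj, if_pos hj]
        have hlen : j < (L, ac).2.length := (by omega : j < ac.length)
        rw [pvChain_fst _ _ hj]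
        have hsnd := pvChain_snd (fun k => pvPred k c) (L, ac) hj hlen
        rw [Option.map_map]
        cases hL : L[j]? with
        | none => simp
        | some b =>
          simp only [hL, Option.map_some, Function.comp_apply, List.any_cons]
          rw [hsnd]
          cases h1 : ac.getD j false <;> cases h2 : pvPred j c <;>
            cases h3 : s.any (pvPred j) <;> simp [h1, h2, h3]
      · rw [if_neg hj, if_neg hj, pvChain_fst_ge _ _ (by omega)]

-- ===== VERDICT (by name: the statement is the Claim_ definition above) =====
theorem check_spec : Claim_equal_check := by
  intro string L ac hdom hpre
  unfold Spec_check
  cases hs : string.toList with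
  | nil =>
    rw [check, hs, checkA, check_alt, hs]
    simp
  | cons c s =>
    have hne : string.toList.isEmpty = false := by rw [hs]; rfl
    have hb := pvBridgeB string hne L ac
    rw [hs] at hb
    rw [check, hs, hb]
    by_cases hg : pvGuard ac = true
    · rw [pvBridgeA, if_pos hg, if_pos hg]
    · rw [if_neg hg]
      have h5 : 5 ≤ ac.length := by
        rcases hpre with h | ⟨hane, hall⟩ | ⟨h5, -⟩
        · exfalso
          rw [h, show ("" : String).toList = [] from rfl] at hs
          simp at hs
        · exact absurd (pvAll_true_guard ac hane hall) hg
        · exact h5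
      apply List.ext_getElem?
      intro j
      rw [pvLemA (c :: s) L ac h5 j]
      by_cases hj : j < 5
      · rw [if_pos hj, pvChain_fst _ _ hj]
      · rw [if_neg hj, pvChain_fst_ge _ _ (by omega)]
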